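-- pv_equiv track=rewrite | github.com/skni-kod/PyChan-Bot | PyChan/Core/Commands/Maths/Functions/permutations_functions.py | inversion_vector
-- ===== SOURCE A (Python) =====
-- def all_inversions(perm):
--     """
--     Generate all inversions of permutation
--
--     :param perm: Permutation in one-line notation
--     :type perm: list
--
--     :return: Returns list with all inversions
--     :rtype: list
--     """
--     inversions = []
--     for i in range(len(perm)):
--         for j in range(i + 1, len(perm)):
--             if perm[i] > perm[j]:
--                 inversions.append([perm[i], perm[j]])
--
--     return inversions
--
-- def inversion_vector(perm):
--     """
--     Generate inversion vector of permutation
--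
--     :param perm: Permutation in one-line notation
--     :type perm: list
--
--     :return: Returns inversion vector of permutation
--     :rtype: list
--     """
--     invers = all_inversions(perm)
--     vector = [0] * len(perm)
--
--     for i in range(len(perm)):
--         for j in invers:
--             if j[0] == perm[i]:
--                 vector[i] += 1
--     return vector
-- ===== SOURCE B (Python) =====
-- def inversion_vector(perm):
--     """
--     Generate inversion vector of permutation
--
--     :param perm: Permutation in one-line notation
--     :type perm: list
--
--     :return: Returns inversion vector of permutation
--     :rtype: list
--     """
--     n = len(perm)
--     totals = {}
--     for k in range(n):
--         c = 0
--         for l in range(k + 1, n):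
--             if perm[l] < perm[k]:
--                 c += 1
--         totals[perm[k]] = totals.get(perm[k], 0) + c
--     return [totals[v] for v in perm]
-- ===== Notes on version B (the rewrite author's own statement) =====
-- stated objective: faster
-- what changed: B never materialises the list of inversion pairs: it counts smaller-later elements per position in one quadratic pass, aggregates the counts per value in a dict built once, and maps each element to its total, replacing A's build-all-pairs-then-rescan-per-index triple loop.
import Mathlib
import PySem

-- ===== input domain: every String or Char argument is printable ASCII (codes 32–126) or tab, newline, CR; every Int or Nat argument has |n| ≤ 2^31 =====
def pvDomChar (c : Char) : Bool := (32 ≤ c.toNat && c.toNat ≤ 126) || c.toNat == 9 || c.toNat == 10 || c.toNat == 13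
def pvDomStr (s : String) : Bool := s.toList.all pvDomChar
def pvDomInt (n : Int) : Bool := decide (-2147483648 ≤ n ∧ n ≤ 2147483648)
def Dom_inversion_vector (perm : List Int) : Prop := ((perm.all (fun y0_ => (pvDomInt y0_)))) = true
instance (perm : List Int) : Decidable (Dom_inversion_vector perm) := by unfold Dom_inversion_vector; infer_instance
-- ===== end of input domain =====

-- B never builds the list of inversion pairs: it counts smaller-later elements per position,
-- totals the counts per value in a dict, and maps each element to its total.

-- ===== PORT A =====
-- literal port of all_inversions: nested index loops appending [perm[i], perm[j]]
-- (indices drawn from range(len) are in bounds, so pyGetD with default 0 is exact)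
def all_inversions (perm : List Int) : List (List Int) :=
  (PySem.List.pyRange 0 perm.length 1).foldl (fun inversions i =>
    (PySem.List.pyRange (i + 1) perm.length 1).foldl (fun inversions j =>
      if PySem.List.pyGetD perm i 0 > PySem.List.pyGetD perm j 0 then
        inversions ++ [[PySem.List.pyGetD perm i 0, PySem.List.pyGetD perm j 0]]
      else inversions) inversions) []

def inversion_vector (perm : List Int) : List Int :=
  let invers := all_inversions perm
  let vector := List.replicate perm.length (0 : Int)
  (PySem.List.pyRange 0 perm.length 1).foldl (fun vector i =>
    invers.foldl (fun vector j =>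
      if PySem.List.pyGetD j 0 0 = PySem.List.pyGetD perm i 0 then
        PySem.List.pySetD vector i (PySem.List.pyGetD vector i 0 + 1)
      else vector) vector) vector

-- ===== PORT B =====
def inversion_vector_alt (perm : List Int) : List Int :=
  let n : Int := perm.length
  let totals : PySem.Dict Int Int :=
    (PySem.List.pyRange 0 n 1).foldl (fun totals k =>
      let c := (PySem.List.pyRange (k + 1) n 1).foldl (fun c l =>
        if PySem.List.pyGetD perm l 0 < PySem.List.pyGetD perm k 0 then c + 1 else c) (0 : Int)
      totals.insert (PySem.List.pyGetD perm k 0)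
        (totals.getD (PySem.List.pyGetD perm k 0) 0 + c)) PySem.Dict.empty
  -- totals[v]: every v ∈ perm is a key of totals, so getD 0 equals Python's raising lookup here
  perm.map (fun v => totals.getD v 0)

-- ===== PRECONDITION & SPEC =====
def Spec_inversion_vector (perm : List Int) (out : List Int) : Prop := out = inversion_vector_alt perm
instance (perm : List Int) (out : List Int) : Decidable (Spec_inversion_vector perm out) := by unfold Spec_inversion_vector; infer_instance

-- ===== CLAIM (what is proved, stated in full; the proofs are below) =====
def Claim_equal_inversion_vector : Prop := ∀ (perm : List Int), Dom_inversion_vector perm → Spec_inversion_vector perm (inversion_vector perm)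

-- ===== LEMMAS AND PROOFS =====

-- number of inversions of perm whose left position is k (an Int index into perm)
def pvCnt (perm : List Int) (k : Int) : Int :=
  (((PySem.List.pyRange (k + 1) perm.length 1).countP
      (fun l => decide (PySem.List.pyGetD perm l 0 < PySem.List.pyGetD perm k 0))) : Int)

-- total number of inversion pairs of perm whose left VALUE is v
def pvS (perm : List Int) (v : Int) : Int :=
  ((PySem.List.pyRange 0 perm.length 1).map
      (fun k => if PySem.List.pyGetD perm k 0 = v then pvCnt perm k else 0)).sum

theorem pv_invers (perm : List Int) :
    all_inversions perm = (PySem.List.pyRange 0 perm.length 1).flatMap (fun i =>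
      ((PySem.List.pyRange (i + 1) perm.length 1).filter
          (fun j => decide (PySem.List.pyGetD perm i 0 > PySem.List.pyGetD perm j 0))).map
        (fun j => [PySem.List.pyGetD perm i 0, PySem.List.pyGetD perm j 0])) := by
  unfold all_inversions
  simp only [PySem.List.foldl_append_ite, PySem.List.foldl_append_eq_flatMap, List.nil_append]

theorem pv_countA (perm : List Int) (v : Int) :
    (((all_inversions perm).countP (fun j => decide (PySem.List.pyGetD j 0 0 = v))) : Int)
      = pvS perm v := by
  rw [pv_invers, List.countP_flatMap, Nat.cast_list_sum, List.map_map]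
  unfold pvS pvCnt
  apply congrArg List.sum
  apply List.map_congr_left
  intro i _
  simp only [Function.comp, List.countP_map]
  by_cases h : PySem.List.pyGetD perm i 0 = v
  · have hq : ((fun j => decide (PySem.List.pyGetD j 0 0 = v)) ∘
        fun j => [PySem.List.pyGetD perm i 0, PySem.List.pyGetD perm j 0]) = fun _ => true := by
      funext j; simp [PySem.List.pyGetD_zero_cons, h]
    rw [hq, List.countP_true, if_pos h]
    simp [List.countP_eq_length_filter]
  · have hq : ((fun j => decide (PySem.List.pyGetD j 0 0 = v)) ∘
        fun j => [PySem.List.pyGetD perm i 0, PySem.List.pyGetD perm j 0]) = fun _ => false := by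
      funext j; simp [PySem.List.pyGetD_zero_cons, h]
    rw [hq, List.countP_false, if_neg h]
    simp

theorem pv_innerA (t : Int) (L : List (List Int)) : ∀ (vec : List Int) (k : Nat), k < vec.length →
    L.foldl (fun v j => if PySem.List.pyGetD j 0 0 = t then v.set k (v.getD k 0 + 1) else v) vec
      = vec.set k (vec.getD k 0 + ((L.countP (fun j => decide (PySem.List.pyGetD j 0 0 = t))) : Int)) := by
  induction L with
  | nil =>
    intro vec k hk
    simp [List.getD_eq_getElem?_getD, hk]
  | cons j L ih =>
    intro vec k hk
    simp only [List.foldl_cons, List.countP_cons]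
    by_cases hj : PySem.List.pyGetD j 0 0 = t
    · rw [if_pos hj]
      rw [ih (vec.set k (vec.getD k 0 + 1)) k (by simpa using hk)]
      rw [List.set_set]
      have hget : (vec.set k (vec.getD k 0 + 1)).getD k 0 = vec.getD k 0 + 1 := by
        simp [List.getD_eq_getElem?_getD, hk]
      rw [hget]
      simp only [hj, decide_true, if_pos]
      congr 1
      push_cast
      ring
    · rw [if_neg hj]
      rw [ih vec k hk]
      simp [hj]

-- value of A's vector at position i
def pvM (perm : List Int) (inv : List (List Int)) (i : Nat) : Int :=
  ((inv.countP (fun j => decide (PySem.List.pyGetD j 0 0 = perm.getD i 0))) : Int)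

theorem pv_outerA (perm : List Int) (inv : List (List Int)) : ∀ (t : Nat), t ≤ perm.length →
    (List.range t).foldl (fun vector i =>
        inv.foldl (fun v j =>
          if PySem.List.pyGetD j 0 0 = perm.getD i 0 then v.set i (v.getD i 0 + 1) else v) vector)
      (List.replicate perm.length (0 : Int))
      = (List.range t).map (pvM perm inv) ++ List.replicate (perm.length - t) (0 : Int) := by
  intro t
  induction t with
  | zero => intro _; simp
  | succ t ih =>
    intro h
    rw [List.range_succ, List.foldl_append, ih (by omega), List.foldl_cons, List.foldl_nil]
    obtain ⟨m, hm⟩ : ∃ m, perm.length - t = m + 1 := ⟨perm.length - t - 1, by omega⟩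
    rw [hm, List.replicate_succ]
    have hpre : ((List.range t).map (pvM perm inv)).length = t := by simp
    have hlen : t < ((List.range t).map (pvM perm inv) ++ (0 : Int) :: List.replicate m (0 : Int)).length := by
      simp
    rw [pv_innerA _ _ _ t hlen]
    rw [List.getD_append_right _ _ _ _ (by omega)]
    rw [List.set_append_right _ _ (by omega)]
    simp only [hpre, Nat.sub_self, List.getD_cons_zero, List.set_cons_zero]
    rw [List.map_append, List.append_assoc]
    congr 1
    simp only [List.map_cons, List.map_nil, List.cons_append, List.nil_append]
    congr 1
    · simp [pvM]
    · congr 1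
      omega

theorem pv_range_getD (perm : List Int) :
    (List.range perm.length).map (fun i => perm.getD i 0) = perm := by
  apply List.ext_getElem
  · simp
  · intro i h1 h2
    rw [List.getElem_map, List.getElem_range]
    rw [List.getD_eq_getElem?_getD, List.getElem?_eq_getElem h2]
    rfl

theorem pv_A_eq (perm : List Int) : inversion_vector perm = perm.map (fun v => pvS perm v) := by
  unfold inversion_vector
  rw [PySem.List.pyRange_zero_nat perm.length, List.foldl_map]
  simp only [PySem.List.pySetD_natCast, PySem.List.pyGetD_natCast]
  rw [pv_outerA perm (all_inversions perm) perm.length le_rfl]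
  simp only [Nat.sub_self, List.replicate_zero, List.append_nil]
  have hFG : ∀ i ∈ List.range perm.length,
      pvM perm (all_inversions perm) i = pvS perm (perm.getD i 0) := by
    intro i _
    unfold pvM
    exact pv_countA perm (perm.getD i 0)
  calc (List.range perm.length).map (pvM perm (all_inversions perm))
      = (List.range perm.length).map (fun i => pvS perm (perm.getD i 0)) :=
        List.map_congr_left hFG
    _ = ((List.range perm.length).map (fun i => perm.getD i 0)).map (fun v => pvS perm v) := by
        rw [List.map_map]; rfl
    _ = perm.map (fun v => pvS perm v) := by rw [pv_range_getD]

theorem pv_dictB (perm : List Int) : ∀ (ks : List Int) (d : PySem.Dict Int Int) (v : Int),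
    (ks.foldl (fun totals k => totals.insert (PySem.List.pyGetD perm k 0)
        (totals.getD (PySem.List.pyGetD perm k 0) 0 + (0 + pvCnt perm k))) d).getD v 0
      = d.getD v 0
        + (ks.map (fun k => if PySem.List.pyGetD perm k 0 = v then pvCnt perm k else 0)).sum := by
  intro ks
  induction ks with
  | nil => intro d v; simp
  | cons k ks ih =>
    intro d v
    simp only [List.foldl_cons, List.map_cons, List.sum_cons, ih, PySem.Dict.getD_insert]
    by_cases h : v = PySem.List.pyGetD perm k 0
    · rw [if_pos h, if_pos h.symm, h]
      ring
    · rw [if_neg h, if_neg (fun hc => h hc.symm)]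
      ring

theorem pv_B_eq (perm : List Int) : inversion_vector_alt perm = perm.map (fun v => pvS perm v) := by
  unfold inversion_vector_alt
  simp only [PySem.List.foldl_ite_add_one]
  have hstep : (fun (totals : PySem.Dict Int Int) (k : Int) =>
      totals.insert (PySem.List.pyGetD perm k 0)
        (totals.getD (PySem.List.pyGetD perm k 0) 0
          + (0 + (((PySem.List.pyRange (k + 1) perm.length 1).countP
              (fun l => decide (PySem.List.pyGetD perm l 0 < PySem.List.pyGetD perm k 0))) : Int))))
      = (fun (totals : PySem.Dict Int Int) (k : Int) =>
      totals.insert (PySem.List.pyGetD perm k 0)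
        (totals.getD (PySem.List.pyGetD perm k 0) 0 + (0 + pvCnt perm k))) := by
    rfl
  rw [hstep, ]
  apply List.map_congr_left
  intro v _
  rw [pv_dictB perm]
  unfold pvS
  simp

-- ===== VERDICT (by name: the statement is the Claim_ definition above) =====
theorem inversion_vector_spec : Claim_equal_inversion_vector := by
  intro perm _
  unfold Spec_inversion_vector
  rw [pv_A_eq, pv_B_eq]
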